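-- pv_equiv track=rewrite | github.com/EdwinOrtegaK/Deteccion-Correccion_1 | crc32/receiver.py | crc32_msb_bits
-- ===== SOURCE A (Python) =====
-- POLY = 0x04C11DB7
--
-- def crc32_msb_bits(bits):
--     reg = 0xFFFFFFFF
--     for c in bits:
--         bit = 1 if c == "1" else 0
--         feedback = ((reg >> 31) & 1) ^ bit
--         reg = ((reg << 1) & 0xFFFFFFFF)
--         if feedback:
--             reg ^= POLY
--     return reg ^ 0xFFFFFFFF
-- ===== SOURCE B (Python) =====
-- POLY = 0x04C11DB7
--
-- _TABLE = []
-- for _i in range(256):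
--     _crc = (_i << 24) & 0xFFFFFFFF
--     for _ in range(8):
--         if _crc & 0x80000000:
--             _crc = ((_crc << 1) ^ POLY) & 0xFFFFFFFF
--         else:
--             _crc = (_crc << 1) & 0xFFFFFFFF
--     _TABLE.append(_crc)
--
-- def crc32_msb_bits(bits):
--     reg = 0xFFFFFFFF
--     n = len(bits) - (len(bits) % 8)
--     for j in range(0, n, 8):
--         byte = 0
--         for c in bits[j:j + 8]:
--             byte = (byte << 1) | (1 if c == "1" else 0)
--         reg = ((reg << 8) & 0xFFFFFFFF) ^ _TABLE[((reg >> 24) ^ byte) & 0xFF]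
--     for c in bits[n:]:
--         bit = 1 if c == "1" else 0
--         feedback = ((reg >> 31) & 1) ^ bit
--         reg = (reg << 1) & 0xFFFFFFFF
--         if feedback:
--             reg ^= POLY
--     return reg ^ 0xFFFFFFFF
-- ===== Notes on version B (the rewrite author's own statement) =====
-- stated objective: faster
-- what changed: Replaces the per-bit CRC feedback loop with a precomputed 256-entry CRC table and a byte-at-a-time update (8 input bits packed and consumed per table lookup), with the <8 trailing bits handled by the original bit loop.
import Mathlib
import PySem

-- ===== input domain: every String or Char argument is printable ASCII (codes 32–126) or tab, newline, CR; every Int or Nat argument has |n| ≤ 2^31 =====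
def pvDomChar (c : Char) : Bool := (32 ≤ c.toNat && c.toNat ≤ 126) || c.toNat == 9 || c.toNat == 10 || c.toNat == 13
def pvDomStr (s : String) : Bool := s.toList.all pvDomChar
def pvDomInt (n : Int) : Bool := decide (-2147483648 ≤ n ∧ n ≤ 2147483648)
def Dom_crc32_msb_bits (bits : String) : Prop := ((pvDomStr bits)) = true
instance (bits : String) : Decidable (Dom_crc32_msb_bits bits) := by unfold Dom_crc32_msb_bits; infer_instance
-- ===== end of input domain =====

-- B replaces A's bit-at-a-time CRC loop by a 256-entry table built once, consuming the
-- input eight bits at a time (the < 8 trailing bits fall back to the bit loop); measured faster.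


-- ===== PORT A =====
def pvAStep (reg : Int) (c : Char) : Int :=
  let bit : Int := if c = '1' then 1 else 0
  let feedback := PySem.Int.bxor (PySem.Int.band (reg >>> (31 : Nat)) 1) bit
  let reg2 := PySem.Int.band (reg <<< (1 : Nat)) 0xFFFFFFFF
  if feedback ≠ 0 then PySem.Int.bxor reg2 0x04C11DB7 else reg2

def crc32_msb_bits (bits : String) : Int :=
  PySem.Int.bxor (bits.toList.foldl pvAStep 0xFFFFFFFF) 0xFFFFFFFF

-- ===== PORT B =====
def pvBRound (crc : Int) : Int :=
  if PySem.Int.band crc 0x80000000 ≠ 0 then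
    PySem.Int.band (PySem.Int.bxor (crc <<< (1 : Nat)) 0x04C11DB7) 0xFFFFFFFF
  else PySem.Int.band (crc <<< (1 : Nat)) 0xFFFFFFFF

def pvBTable : List Int :=
  (List.range 256).map (fun (i : Nat) =>
    (List.range 8).foldl (fun crc _ => pvBRound crc)
      (PySem.Int.band (((i : Nat) : Int) <<< (24 : Nat)) 0xFFFFFFFF))

def pvBPack (cs : List Char) : Int :=
  cs.foldl (fun b c => PySem.Int.bor (b <<< (1 : Nat)) (if c = '1' then 1 else 0)) 0

def pvBBitStep (reg : Int) (c : Char) : Int :=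
  let bit : Int := if c = '1' then 1 else 0
  let feedback := PySem.Int.bxor (PySem.Int.band (reg >>> (31 : Nat)) 1) bit
  let reg2 := PySem.Int.band (reg <<< (1 : Nat)) 0xFFFFFFFF
  if feedback ≠ 0 then PySem.Int.bxor reg2 0x04C11DB7 else reg2

def pvBByteStep (reg byte : Int) : Int :=
  PySem.Int.bxor (PySem.Int.band (reg <<< (8 : Nat)) 0xFFFFFFFF)
    (pvBTable.getD (PySem.Int.band (PySem.Int.bxor (reg >>> (24 : Nat)) byte) 0xFF).toNat 0)

def pvBLoop : Int → List Char → Int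
  | reg, c0 :: c1 :: c2 :: c3 :: c4 :: c5 :: c6 :: c7 :: rest =>
      pvBLoop (pvBByteStep reg (pvBPack [c0, c1, c2, c3, c4, c5, c6, c7])) rest
  | reg, rest => rest.foldl pvBBitStep reg

def crc32_msb_bits_alt (bits : String) : Int :=
  PySem.Int.bxor (pvBLoop 0xFFFFFFFF bits.toList) 0xFFFFFFFF

-- ===== PRECONDITION & SPEC =====
def Spec_crc32_msb_bits (bits : String) (out : Int) : Prop := out = crc32_msb_bits_alt bits
instance (bits : String) (out : Int) : Decidable (Spec_crc32_msb_bits bits out) := by unfold Spec_crc32_msb_bits; infer_instance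

-- ===== CLAIM (what is proved, stated in full; the proofs are below) =====
def Claim_equal_crc32_msb_bits : Prop := ∀ (bits : String), Dom_crc32_msb_bits bits → Spec_crc32_msb_bits bits (crc32_msb_bits bits)

-- ===== LEMMAS AND PROOFS =====

/-! Nat mirrors of the two ports (all register values are nonnegative, so both ports
    compute images of these Nat functions). -/

def nStep (reg : Nat) (c : Char) : Nat :=
  let bit : Nat := if c = '1' then 1 else 0
  let fb := ((reg >>> 31) &&& 1) ^^^ bit
  let r2 := (reg <<< 1) &&& 4294967295
  if fb ≠ 0 then r2 ^^^ 79764919 else r2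

def nRound (crc : Nat) : Nat :=
  if crc &&& 2147483648 ≠ 0 then ((crc <<< 1) ^^^ 79764919) &&& 4294967295
  else (crc <<< 1) &&& 4294967295

def nTable : List Nat :=
  (List.range 256).map (fun i => (List.range 8).foldl (fun crc _ => nRound crc) ((i <<< 24) &&& 4294967295))

def nPack (cs : List Char) : Nat :=
  cs.foldl (fun b c => (b <<< 1) ||| (if c = '1' then 1 else 0)) 0

def nByteStep (reg byte : Nat) : Nat :=
  ((reg <<< 8) &&& 4294967295) ^^^ nTable.getD (((reg >>> 24) ^^^ byte) &&& 255) 0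

def nLoop : Nat → List Char → Nat
  | reg, c0 :: c1 :: c2 :: c3 :: c4 :: c5 :: c6 :: c7 :: rest =>
      nLoop (nByteStep reg (nPack [c0, c1, c2, c3, c4, c5, c6, c7])) rest
  | reg, rest => rest.foldl nStep reg

/-! the abstract one-bit step and its algebra -/

def sStep (reg : Nat) (b : Bool) : Nat :=
  ((reg <<< 1) &&& 4294967295) ^^^ (if reg.testBit 31 != b then 79764919 else 0)

def sRun (reg : Nat) (bs : List Bool) : Nat := bs.foldl sStep reg

def pk : List Bool → Nat
  | [] => 0
  | b :: bs => (if b then 2 ^ bs.length else 0) + pk bs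

theorem mask_lt (a : Nat) : a &&& 4294967295 < 2 ^ 32 :=
  lt_of_le_of_lt Nat.and_le_right (by norm_num)

theorem mask_id {a : Nat} (h : a < 2 ^ 32) : a &&& 4294967295 = a := by
  have : (4294967295 : Nat) = 2 ^ 32 - 1 := by norm_num
  rw [this]; exact Nat.and_two_pow_sub_one_of_lt_two_pow h

theorem sStep_lt (reg : Nat) (b : Bool) : sStep reg b < 2 ^ 32 := by
  unfold sStep
  exact Nat.xor_lt_two_pow (mask_lt _) (by split <;> norm_num)

theorem sRun_lt : ∀ (bs : List Bool) (reg : Nat), reg < 2 ^ 32 → sRun reg bs < 2 ^ 32 := by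
  intro bs
  induction bs with
  | nil => intro reg h; exact h
  | cons b bs ih => intro reg _; exact ih _ (sStep_lt reg b)

theorem nStep_eq_sStep {reg : Nat} (h : reg < 2 ^ 32) (c : Char) :
    nStep reg c = sStep reg (c == '1') := by
  have h2 : reg >>> 31 = 0 ∨ reg >>> 31 = 1 := by
    have : reg >>> 31 < 2 := by
      rw [Nat.shiftRight_eq_div_pow]
      exact Nat.div_lt_iff_lt_mul (by norm_num) |>.2 (by norm_num at h ⊢; omega)
    omega
  have htb : reg.testBit 31 = ((reg >>> 31) &&& 1 != 0) := by
    simp [Nat.testBit, Nat.and_comm]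
  by_cases hc : c = '1' <;> rcases h2 with h2 | h2 <;>
    simp [nStep, sStep, hc, htb, h2]

theorem sStep_xor (x y : Nat) (b c : Bool) :
    sStep (x ^^^ y) (b != c) = sStep x b ^^^ sStep y c := by
  unfold sStep
  rw [Nat.shiftLeft_xor_distrib, Nat.and_xor_distrib_right]
  cases hx : x.testBit 31 <;> cases hy : y.testBit 31 <;> cases b <;> cases c <;>
    simp [Nat.testBit_xor, hx, hy, Nat.xor_assoc, Nat.xor_left_comm, Nat.xor_comm]

theorem sStep_false_small {y : Nat} (h : y < 2 ^ 31) : sStep y false = y <<< 1 := by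
  have h1 : y.testBit 31 = false := Nat.testBit_lt_two_pow h
  have h2 : y <<< 1 < 2 ^ 32 := by
    rw [Nat.shiftLeft_eq, pow_one]
    have e1 : (2 : Nat) ^ 31 = 2147483648 := by norm_num
    have e2 : (2 : Nat) ^ 32 = 4294967296 := by norm_num
    omega
  simp [sStep, h1, mask_id h2]

theorem absorb_bit (x : Nat) (b : Bool) :
    sStep ((if b then 2 ^ 31 else 0) ^^^ x) false = sStep x b := by
  have h := sStep_xor (if b then 2 ^ 31 else 0) x b b
  have hb : (b != b) = false := by cases b <;> rfl
  rw [hb] at h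
  rw [h]
  have hz : sStep (if b then 2 ^ 31 else 0) b = 0 := by
    cases b <;> simp [sStep, Nat.testBit_two_pow_self] <;> decide
  rw [hz, Nat.zero_xor]

theorem shl_xor_add {k low : Nat} (a : Nat) (h : low < 2 ^ k) :
    (a <<< k) ^^^ low = a <<< k + low := by
  rw [Nat.shiftLeft_add_eq_or_of_lt h a]
  apply Nat.eq_of_testBit_eq
  intro i
  by_cases hi : k ≤ i
  · have : low.testBit i = false :=
      Nat.testBit_lt_two_pow (lt_of_lt_of_le h (Nat.pow_le_pow_right (by norm_num) hi))
    simp [Nat.testBit_xor, Nat.testBit_or, this]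
  · simp [Nat.testBit_xor, Nat.testBit_or, Nat.testBit_shiftLeft, hi]

theorem pk_lt : ∀ bs : List Bool, pk bs < 2 ^ bs.length := by
  intro bs
  induction bs with
  | nil => simp [pk]
  | cons b bs ih =>
      have : (2 : Nat) ^ (b :: bs).length = 2 ^ bs.length + 2 ^ bs.length := by
        simp [List.length_cons, Nat.pow_succ]; omega
      rw [this]; unfold pk; split <;> omega

theorem sRun_xor : ∀ (bs : List Bool) (x y : Nat),
    sRun (x ^^^ y) bs = sRun x bs ^^^ sRun y (List.replicate bs.length false) := by
  intro bs
  induction bs with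
  | nil => intro x y; simp [sRun]
  | cons b bs ih =>
      intro x y
      have hb : b = (b != false) := by cases b <;> rfl
      calc sRun (x ^^^ y) (b :: bs) = sRun (sStep (x ^^^ y) b) bs := rfl
        _ = sRun (sStep x b ^^^ sStep y false) bs := by
              conv_lhs => rw [hb, sStep_xor]
        _ = _ := by rw [ih]; rfl

theorem zrun : ∀ (k y : Nat), y * 2 ^ k < 2 ^ 32 →
    sRun y (List.replicate k false) = y <<< k := by
  intro k
  induction k with
  | zero => intro y _; simp [sRun]
  | succ k ih =>
      intro y h
      have hy : y < 2 ^ 31 := by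
        have ht : 0 < 2 ^ k := Nat.pow_pos (by norm_num)
        have h2 : y * 2 ≤ y * 2 ^ (k + 1) :=
          Nat.mul_le_mul_left y (by
            calc (2 : Nat) = 2 ^ 1 := rfl
              _ ≤ 2 ^ (k + 1) := Nat.pow_le_pow_right (by norm_num) (by omega))
        have e1 : (2 : Nat) ^ 31 = 2147483648 := by norm_num
        have e2 : (2 : Nat) ^ 32 = 4294967296 := by norm_num
        omega
      have hstep : sStep y false = y <<< 1 := sStep_false_small hy
      have hbound : (y <<< 1) * 2 ^ k < 2 ^ 32 := by
        rw [Nat.shiftLeft_eq, pow_one]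
        have : y * 2 * 2 ^ k = y * 2 ^ (k + 1) := by rw [pow_succ]; ring
        rw [this]; exact h
      calc sRun y (List.replicate (k + 1) false)
          = sRun (sStep y false) (List.replicate k false) := rfl
        _ = (y <<< 1) <<< k := by rw [hstep, ih _ hbound]
        _ = y <<< (k + 1) := by rw [← Nat.shiftLeft_add, Nat.add_comm]
  

theorem shl_add_distrib (a b k : Nat) : (a + b) <<< k = a <<< k + b <<< k := by
  simp [Nat.shiftLeft_eq, Nat.add_mul]

theorem absorb : ∀ (bs : List Bool) (x : Nat), bs.length ≤ 32 →
    sRun x bs = sRun (x ^^^ (pk bs <<< (32 - bs.length))) (List.replicate bs.length false) := by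
  intro bs
  induction bs with
  | nil => intro x _; simp [sRun, pk]
  | cons b bs ih =>
      intro x hlen
      have hn : bs.length ≤ 31 := by simp at hlen; omega
      have hlow : pk bs <<< (31 - bs.length) < 2 ^ 31 := by
        rw [Nat.shiftLeft_eq]
        calc pk bs * 2 ^ (31 - bs.length) < 2 ^ bs.length * 2 ^ (31 - bs.length) :=
              (Nat.mul_lt_mul_right (Nat.pow_pos (by norm_num))).2 (pk_lt bs)
          _ = 2 ^ 31 := by rw [← Nat.pow_add]; congr 1; omega
      have hsplit : pk (b :: bs) <<< (32 - (b :: bs).length)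
          = (if b then 2 ^ 31 else 0) ^^^ (pk bs <<< (31 - bs.length)) := by
        have h32 : 32 - (b :: bs).length = 31 - bs.length := by simp
        rw [h32]
        show ((if b then 2 ^ bs.length else 0) + pk bs) <<< (31 - bs.length) = _
        cases b
        · simp
        · simp only [reduceIte]
          rw [shl_add_distrib]
          have h1 : (2 : Nat) ^ bs.length <<< (31 - bs.length) = 1 <<< 31 := by
            rw [Nat.shiftLeft_eq, Nat.one_shiftLeft, ← Nat.pow_add]; congr 1; omega
          rw [h1, ← shl_xor_add 1 hlow, Nat.one_shiftLeft]
      have key : sStep (x ^^^ pk (b :: bs) <<< (32 - (b :: bs).length)) false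
          = sStep x b ^^^ pk bs <<< (32 - bs.length) := by
        rw [hsplit]
        have hre : x ^^^ ((if b then 2 ^ 31 else 0) ^^^ (pk bs <<< (31 - bs.length)))
            = ((if b then 2 ^ 31 else 0) ^^^ x) ^^^ (pk bs <<< (31 - bs.length)) := by
          rw [← Nat.xor_assoc, Nat.xor_comm x]
        rw [hre]
        have hff : (false != false) = false := rfl
        rw [← hff, sStep_xor, absorb_bit, sStep_false_small hlow,
            ← Nat.shiftLeft_add]
        congr 2
        omega
      calc sRun x (b :: bs) = sRun (sStep x b) bs := rfl
        _ = sRun (sStep x b ^^^ pk bs <<< (32 - bs.length)) (List.replicate bs.length false) :=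
              ih _ (by omega)
        _ = _ := by rw [← key]; rfl

theorem decomp (reg : Nat) : ((reg >>> 24) <<< 24) ^^^ (reg % 2 ^ 24) = reg := by
  rw [shl_xor_add _ (Nat.mod_lt _ (by norm_num)), Nat.shiftRight_eq_div_pow, Nat.shiftLeft_eq]
  rw [show (2 : Nat) ^ 24 = 16777216 by norm_num]
  omega

theorem nRound_eq (crc : Nat) : nRound crc = sStep crc false := by
  have hc : crc &&& 2147483648 = (crc.testBit 31).toNat * 2 ^ 31 := by
    have : (2147483648 : Nat) = 2 ^ 31 := by norm_num
    rw [this, Nat.and_two_pow]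
  have hP : (79764919 : Nat) &&& 4294967295 = 79764919 := by decide
  cases ht : crc.testBit 31 <;>
    simp [nRound, sStep, hc, ht, Nat.and_xor_distrib_right, hP]

theorem foldl_const_iterate {α : Type} : ∀ (l : List α) (g : Nat → Nat) (x : Nat),
    l.foldl (fun a _ => g a) x = g^[l.length] x := by
  intro l
  induction l with
  | nil => intro g x; rfl
  | cons a l ih => intro g x; simp [List.foldl, ih, Function.iterate_succ_apply]

theorem sRun_rep_iterate : ∀ (n : Nat) (x : Nat),
    sRun x (List.replicate n false) = (fun a => sStep a false)^[n] x := by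
  intro n
  induction n with
  | zero => intro x; rfl
  | succ n ih =>
      intro x
      rw [List.replicate_succ]
      show sRun (sStep x false) (List.replicate n false) = _
      rw [ih, Function.iterate_succ_apply]

theorem nTable_getD {j : Nat} (h : j < 256) :
    nTable.getD j 0 = sRun (j <<< 24) (List.replicate 8 false) := by
  have hm : (j <<< 24) &&& 4294967295 = j <<< 24 := by
    apply mask_id
    rw [Nat.shiftLeft_eq]
    calc j * 2 ^ 24 < 256 * 2 ^ 24 := (Nat.mul_lt_mul_right (by norm_num)).2 h
      _ = 2 ^ 32 := by norm_num
  have : nTable.getD j 0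
      = (List.range 8).foldl (fun crc _ => nRound crc) ((j <<< 24) &&& 4294967295) := by
    unfold nTable
    rw [List.getD_eq_getElem?_getD, List.getElem?_map, List.getElem?_range h]
    rfl
  rw [this, hm, foldl_const_iterate, sRun_rep_iterate]
  simp [funext nRound_eq]

theorem byte_lemma {reg : Nat} (h : reg < 2 ^ 32) (bs : List Bool) (hlen : bs.length = 8) :
    sRun reg bs = ((reg <<< 8) &&& 4294967295) ^^^ nTable.getD (((reg >>> 24) ^^^ pk bs) &&& 255) 0 := by
  have e8 : (2 : Nat) ^ 8 = 256 := by norm_num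
  have hhi : reg >>> 24 < 2 ^ 8 := by
    rw [Nat.shiftRight_eq_div_pow]
    refine Nat.div_lt_iff_lt_mul (by norm_num) |>.2 ?_
    have : (2 : Nat) ^ 8 * 2 ^ 24 = 2 ^ 32 := by norm_num
    rw [this]; exact h
  have hpk : pk bs < 2 ^ 8 := by have := pk_lt bs; rwa [hlen] at this
  have hix : (reg >>> 24) ^^^ pk bs < 2 ^ 8 := Nat.xor_lt_two_pow hhi hpk
  have hmask : ((reg >>> 24) ^^^ pk bs) &&& 255 = (reg >>> 24) ^^^ pk bs := by
    have h255 : (255 : Nat) = 2 ^ 8 - 1 := by norm_num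
    rw [h255]; exact Nat.and_two_pow_sub_one_of_lt_two_pow hix
  rw [hmask, nTable_getD (by omega)]
  have hdec : sRun reg bs = sRun (((reg >>> 24) <<< 24) ^^^ (reg % 2 ^ 24)) bs := by
    rw [decomp]
  rw [hdec, sRun_xor, hlen]
  have hz : sRun (reg % 2 ^ 24) (List.replicate 8 false) = (reg % 2 ^ 24) <<< 8 := by
    apply zrun
    calc reg % 2 ^ 24 * 2 ^ 8 < 2 ^ 24 * 2 ^ 8 :=
          (Nat.mul_lt_mul_right (by norm_num)).2 (Nat.mod_lt _ (by norm_num))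
      _ = 2 ^ 32 := by norm_num
  have ha : sRun ((reg >>> 24) <<< 24) bs
      = sRun ((((reg >>> 24)) ^^^ pk bs) <<< 24) (List.replicate 8 false) := by
    have := absorb bs ((reg >>> 24) <<< 24) (by omega)
    rw [hlen] at this
    rw [this, Nat.shiftLeft_xor_distrib]
  have hm8 : (reg <<< 8) &&& 4294967295 = (reg % 2 ^ 24) <<< 8 := by
    have e : (4294967295 : Nat) = 2 ^ 32 - 1 := by norm_num
    rw [e, Nat.and_two_pow_sub_one_eq_mod, Nat.shiftLeft_eq, Nat.shiftLeft_eq,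
        show (2 : Nat) ^ 32 = 2 ^ 24 * 2 ^ 8 by norm_num, Nat.mul_mod_mul_right]
  rw [hz, ha, hm8, Nat.xor_comm]


theorem fold_nStep_sRun : ∀ (cs : List Char) (reg : Nat), reg < 2 ^ 32 →
    cs.foldl nStep reg = sRun reg (cs.map (fun c => c == '1')) := by
  intro cs
  induction cs with
  | nil => intro reg _; rfl
  | cons c cs ih =>
      intro reg h
      show (cs.foldl nStep (nStep reg c)) = sRun (sStep reg (c == '1')) _
      rw [← nStep_eq_sStep h, ih _ (by rw [nStep_eq_sStep h]; exact sStep_lt _ _)]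

theorem packAux : ∀ (cs : List Char) (a : Nat),
    cs.foldl (fun b c => (b <<< 1) ||| (if c = '1' then 1 else 0)) a
      = a <<< cs.length + pk (cs.map (fun c => c == '1')) := by
  intro cs
  induction cs with
  | nil => intro a; simp [pk]
  | cons c cs ih =>
      intro a
      have hbit : (if c = '1' then (1 : Nat) else 0) < 2 ^ 1 := by split <;> norm_num
      show (cs.foldl _ ((a <<< 1) ||| (if c = '1' then 1 else 0))) = _
      rw [← Nat.shiftLeft_add_eq_or_of_lt hbit, ih]
      simp only [List.map_cons, pk, List.length_cons, List.length_map]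
      rw [shl_add_distrib, ← Nat.shiftLeft_add]
      rw [Nat.shiftLeft_eq, Nat.shiftLeft_eq, Nat.shiftLeft_eq]
      have hp : (2 : Nat) ^ (cs.length + 1) = 2 ^ cs.length * 2 := pow_succ 2 cs.length
      by_cases hc : c = '1' <;> simp only [hc, if_true, if_false, beq_iff_eq, reduceIte, hp, pow_one] <;> ring

theorem nPack_eq (cs : List Char) : nPack cs = pk (cs.map (fun c => c == '1')) := by
  have := packAux cs 0
  simpa [nPack] using this

theorem main_loop : ∀ (n : Nat) (l : List Char) (reg : Nat), l.length ≤ n → reg < 2 ^ 32 →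
    l.foldl nStep reg = nLoop reg l := by
  intro n
  induction n with
  | zero =>
      intro l reg hl _
      have : l = [] := List.eq_nil_of_length_eq_zero (by omega)
      subst this; rfl
  | succ n ih =>
      intro l reg hl hreg
      match l with
      | [] => rfl
      | [c0] => rfl
      | [c0, c1] => rfl
      | [c0, c1, c2] => rfl
      | [c0, c1, c2, c3] => rfl
      | [c0, c1, c2, c3, c4] => rfl
      | [c0, c1, c2, c3, c4, c5] => rfl
      | [c0, c1, c2, c3, c4, c5, c6] => rfl
      | c0 :: c1 :: c2 :: c3 :: c4 :: c5 :: c6 :: c7 :: rest =>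
          have hB : nByteStep reg (nPack [c0, c1, c2, c3, c4, c5, c6, c7])
              = sRun reg ([c0, c1, c2, c3, c4, c5, c6, c7].map (fun c => c == '1')) := by
            rw [nPack_eq]
            exact (byte_lemma hreg _ rfl).symm
          have hlt : nByteStep reg (nPack [c0, c1, c2, c3, c4, c5, c6, c7]) < 2 ^ 32 := by
            rw [hB]; exact sRun_lt _ _ hreg
          have hstep : nLoop reg (c0 :: c1 :: c2 :: c3 :: c4 :: c5 :: c6 :: c7 :: rest)
              = nLoop (nByteStep reg (nPack [c0, c1, c2, c3, c4, c5, c6, c7])) rest := rfl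
          rw [hstep, ← ih rest _ (by simp at hl ⊢; omega) hlt]
          rw [show (c0 :: c1 :: c2 :: c3 :: c4 :: c5 :: c6 :: c7 :: rest)
                = [c0, c1, c2, c3, c4, c5, c6, c7] ++ rest from rfl, List.foldl_append]
          congr 1
          rw [hB, ← fold_nStep_sRun _ _ hreg]

/-! casts between the Int ports and their Nat mirrors -/

theorem c_shr (a k : Nat) : ((a : Int) >>> k) = ((a >>> k : Nat) : Int) := by simp
theorem c_shl (a k : Nat) : ((a : Int) <<< k) = ((a <<< k : Nat) : Int) := by simp
theorem c_band1 (a : Nat) : PySem.Int.band (↑a) (1 : Int) = ((a &&& 1 : Nat) : Int) := by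
  simpa using PySem.Int.band_natCast a 1
theorem c_bandM (a : Nat) : PySem.Int.band (↑a) (4294967295 : Int) = ((a &&& 4294967295 : Nat) : Int) := by
  simpa using PySem.Int.band_natCast a 4294967295
theorem c_band255 (a : Nat) : PySem.Int.band (↑a) (255 : Int) = ((a &&& 255 : Nat) : Int) := by
  simpa using PySem.Int.band_natCast a 255
theorem c_bandT (a : Nat) : PySem.Int.band (↑a) (2147483648 : Int) = ((a &&& 2147483648 : Nat) : Int) := by
  simpa using PySem.Int.band_natCast a 2147483648
theorem c_bxorP (a : Nat) : PySem.Int.bxor (↑a) (79764919 : Int) = ((a ^^^ 79764919 : Nat) : Int) := by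
  simpa using PySem.Int.bxor_natCast a 79764919
theorem c_bxor1 (a : Nat) : PySem.Int.bxor (↑a) (1 : Int) = ((a ^^^ 1 : Nat) : Int) := by
  simpa using PySem.Int.bxor_natCast a 1
theorem c_bxor0 (a : Nat) : PySem.Int.bxor (↑a) (0 : Int) = ((a ^^^ 0 : Nat) : Int) := by
  simpa using PySem.Int.bxor_natCast a 0
theorem c_bor1 (a : Nat) : PySem.Int.bor (↑a) (1 : Int) = ((a ||| 1 : Nat) : Int) := by
  simpa using PySem.Int.bor_natCast a 1
theorem c_bor0 (a : Nat) : PySem.Int.bor (↑a) (0 : Int) = ((a ||| 0 : Nat) : Int) := by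
  simpa using PySem.Int.bor_natCast a 0

theorem cast_step (r : Nat) (c : Char) : pvAStep (↑r) c = ↑(nStep r c) := by
  by_cases hc : c = '1' <;>
    simp only [pvAStep, nStep, hc, if_true, if_false, c_shr, c_shl, c_band1, c_bandM,
      c_bxor1, c_bxor0, c_bxorP, ne_eq, Int.natCast_eq_zero,
      apply_ite (fun n : Nat => (n : Int))]

theorem cast_bitstepB (r : Nat) (c : Char) : pvBBitStep (↑r) c = ↑(nStep r c) := cast_step r c

theorem cast_round (r : Nat) : pvBRound (↑r) = ↑(nRound r) := by
  simp only [pvBRound, nRound, c_shl, c_bandT, c_bandM, c_bxorP, ne_eq, Int.natCast_eq_zero,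
    apply_ite (fun n : Nat => (n : Int))]

theorem castFoldl {α : Type} (f : Int → α → Int) (g : Nat → α → Nat)
    (hfg : ∀ (r : Nat) (a : α), f (↑r) a = ↑(g r a)) :
    ∀ (l : List α) (r : Nat), l.foldl f (↑r) = ↑(l.foldl g r) := by
  intro l
  induction l with
  | nil => intro r; rfl
  | cons a l ih => intro r; show l.foldl f (f ↑r a) = _; rw [hfg, ih]; rfl

theorem cast_pack (cs : List Char) : pvBPack cs = ↑(nPack cs) := by
  unfold pvBPack nPack
  exact castFoldl _ _
    (fun r a => by by_cases hc : a = '1' <;> simp only [hc, if_true, if_false, c_shl, c_bor1, c_bor0])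
    cs 0

theorem cast_table (k : Nat) : pvBTable.getD k 0 = ↑(nTable.getD k 0) := by
  by_cases hk : k < 256
  · have h1 : pvBTable.getD k 0 = (List.range 8).foldl (fun crc _ => pvBRound crc)
        (PySem.Int.band (((k : Nat) : Int) <<< (24 : Nat)) 0xFFFFFFFF) := by
      unfold pvBTable
      rw [List.getD_eq_getElem?_getD, List.getElem?_map, List.getElem?_range hk]
      rfl
    have h2 : nTable.getD k 0 = (List.range 8).foldl (fun crc _ => nRound crc)
        ((k <<< 24) &&& 4294967295) := by
      unfold nTable
      rw [List.getD_eq_getElem?_getD, List.getElem?_map, List.getElem?_range hk]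
      rfl
    rw [h1, h2, show (0xFFFFFFFF : Int) = (4294967295 : Int) from rfl, c_shl, c_bandM]
    exact castFoldl _ _ (fun r _ => cast_round r) (List.range 8) _
  · have h1 : pvBTable.getD k 0 = 0 := by
      rw [List.getD_eq_getElem?_getD, List.getElem?_eq_none (by rw [show pvBTable.length = 256 from by simp [pvBTable]]; omega)]
      rfl
    have h2 : nTable.getD k 0 = 0 := by
      rw [List.getD_eq_getElem?_getD, List.getElem?_eq_none (by rw [show nTable.length = 256 from by simp [nTable]]; omega)]
      rfl
    rw [h1, h2]; rfl

theorem cast_byteStep (r b : Nat) : pvBByteStep (↑r) (↑b) = ↑(nByteStep r b) := by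
  unfold pvBByteStep nByteStep
  rw [show (0xFFFFFFFF : Int) = (4294967295 : Int) from rfl,
      show (0xFF : Int) = (255 : Int) from rfl,
      c_shr, c_shl, c_bandM, PySem.Int.bxor_natCast, c_band255, Int.toNat_natCast,
      cast_table, PySem.Int.bxor_natCast]

theorem cast_loop : ∀ (n : Nat) (l : List Char) (r : Nat), l.length ≤ n →
    pvBLoop (↑r) l = ↑(nLoop r l) := by
  intro n
  induction n with
  | zero =>
      intro l r hl
      have : l = [] := List.eq_nil_of_length_eq_zero (by omega)
      subst this; rfl
  | succ n ih =>
      intro l r hl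
      match l with
      | [] => rfl
      | [c0] => exact castFoldl _ _ cast_bitstepB _ r
      | [c0, c1] => exact castFoldl _ _ cast_bitstepB _ r
      | [c0, c1, c2] => exact castFoldl _ _ cast_bitstepB _ r
      | [c0, c1, c2, c3] => exact castFoldl _ _ cast_bitstepB _ r
      | [c0, c1, c2, c3, c4] => exact castFoldl _ _ cast_bitstepB _ r
      | [c0, c1, c2, c3, c4, c5] => exact castFoldl _ _ cast_bitstepB _ r
      | [c0, c1, c2, c3, c4, c5, c6] => exact castFoldl _ _ cast_bitstepB _ r
      | c0 :: c1 :: c2 :: c3 :: c4 :: c5 :: c6 :: c7 :: rest =>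
          show pvBLoop (pvBByteStep (↑r) (pvBPack [c0, c1, c2, c3, c4, c5, c6, c7])) rest = _
          rw [cast_pack, cast_byteStep, ih rest _ (by simp at hl ⊢; omega)]
          rfl

-- ===== VERDICT (by name: the statement is the Claim_ definition above) =====
theorem crc32_msb_bits_spec : Claim_equal_crc32_msb_bits := by
  unfold Claim_equal_crc32_msb_bits
  intro bits _
  unfold Spec_crc32_msb_bits crc32_msb_bits crc32_msb_bits_alt
  rw [show (0xFFFFFFFF : Int) = (((4294967295 : Nat)) : Int) from rfl]
  rw [castFoldl _ _ cast_step bits.toList 4294967295,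
      cast_loop bits.toList.length bits.toList 4294967295 (le_refl _),
      main_loop bits.toList.length bits.toList 4294967295 (le_refl _) (by norm_num)]
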